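-- pv_equiv track=rewrite | github.com/daniel-reich/ubiquitous-fiesta | WixXhsdqcNHe3vTn3_20.py | how_bad
-- ===== SOURCE A (Python) =====
-- def how_bad(n):
--     lst = []
--     sum = 0
--     while n != 0:
--         sum += n%2
--         n//=2
--     if sum%2:
--         lst.append('Odious')
--     else:
--         lst.append('Evil')
--     if sum > 1:
--         k = 0
--         for i in range(2,sum):
--             if sum%i==0:
--                 k = 1
--         if k==0:
--             lst.append('Pernicious')
--     return lst
-- ===== SOURCE B (Python) =====
-- def how_bad(n):
--     s = 0
--     while n != 0:
--         s += n % 2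
--         n //= 2
--     lst = ['Odious'] if s % 2 else ['Evil']
--     if s > 1 and _is_prime(s):
--         lst.append('Pernicious')
--     return lst
--
-- def _is_prime(s):
--     d = 2
--     while d * d <= s:
--         if s % d == 0:
--             return False
--         d += 1
--     return True
-- ===== Notes on version B (the rewrite author's own statement) =====
-- stated objective: alternative
-- what changed: The Pernicious test scans every candidate in range(2,sum) with a flag; B instead tests primality of sum by trial division only up to sqrt(sum), with an early return from a helper.
import Mathlib
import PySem

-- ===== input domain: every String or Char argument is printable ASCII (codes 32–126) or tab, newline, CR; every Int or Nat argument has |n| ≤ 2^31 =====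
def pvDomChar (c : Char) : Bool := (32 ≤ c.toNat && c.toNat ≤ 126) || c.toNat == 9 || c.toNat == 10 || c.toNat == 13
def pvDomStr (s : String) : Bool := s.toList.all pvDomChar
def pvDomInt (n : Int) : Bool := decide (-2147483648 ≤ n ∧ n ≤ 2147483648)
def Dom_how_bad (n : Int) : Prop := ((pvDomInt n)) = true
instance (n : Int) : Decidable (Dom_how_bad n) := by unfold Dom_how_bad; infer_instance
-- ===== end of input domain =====

-- B replaces A's full range(2,sum) divisor scan for the Pernicious test by trial division
-- up to sqrt(sum) with an early exit; the popcount loop and parity branch are unchanged.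

-- ===== PORT A =====
-- A's `while n != 0: sum += n%2; n //= 2` loop; on the admitted domain (Pre_: 0 ≤ n)
-- it runs on a nonnegative int, so it is the following fuel-guarded halving loop on Nat
-- (fuel = n suffices since n halves each step; the guard only makes it total).
def popcAux : Nat → Nat → Nat
  | 0, _ => 0
  | fuel + 1, n => if n = 0 then 0 else n % 2 + popcAux fuel (n / 2)

def popc (n : Nat) : Nat := popcAux n n

def how_bad (n : Int) : List String :=
  let s := popc n.toNat
  let lst := if s % 2 = 1 then ["Odious"] else ["Evil"]
  if 1 < s then
    -- `for i in range(2,sum): if sum%i==0: k=1` then `if k==0`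
    let k := (List.range' 2 (s - 2)).foldl (fun k i => if s % i = 0 then 1 else k) 0
    if k = 0 then lst ++ ["Pernicious"] else lst
  else lst

-- ===== PORT B =====
-- B's `while d*d <= s` trial-division loop with early return; fuel s+1 suffices
-- since the loop stops before d exceeds s+1.
def ipAux : Nat → Nat → Nat → Bool
  | 0, _, _ => true
  | fuel + 1, s, d =>
    if d * d ≤ s then (if s % d = 0 then false else ipAux fuel s (d + 1)) else true

def isPrimeB (s : Nat) : Bool := ipAux (s + 1) s 2

def how_bad_alt (n : Int) : List String :=
  let s := popc n.toNat
  let lst := if s % 2 = 1 then ["Odious"] else ["Evil"]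
  if 1 < s && isPrimeB s then lst ++ ["Pernicious"] else lst

-- ===== PRECONDITION & SPEC =====
-- A's while loop never terminates for negative n (n//2 stalls at -1), so A returns
-- only for nonnegative n; Pre_ admits exactly those inputs.
def Pre_how_bad (n : Int) : Prop := 0 ≤ n
instance (n : Int) : Decidable (Pre_how_bad n) := by unfold Pre_how_bad; infer_instance
def pvWitness_how_bad : Int := (7)

def Spec_how_bad (n : Int) (out : List String) : Prop := out = how_bad_alt n
instance (n : Int) (out : List String) : Decidable (Spec_how_bad n out) := by unfold Spec_how_bad; infer_instance

-- ===== CLAIM (what is proved, stated in full; the proofs are below) =====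
def Claim_equal_how_bad : Prop := ∀ (n : Int), Dom_how_bad n → Pre_how_bad n → Spec_how_bad n (how_bad n)

-- ===== LEMMAS AND PROOFS =====

-- the classification part of each port, as a function of the popcount s
def bodyA (s : Nat) : List String :=
  let lst := if s % 2 = 1 then ["Odious"] else ["Evil"]
  if 1 < s then
    let k := (List.range' 2 (s - 2)).foldl (fun k i => if s % i = 0 then 1 else k) 0
    if k = 0 then lst ++ ["Pernicious"] else lst
  else lst

def bodyB (s : Nat) : List String :=
  let lst := if s % 2 = 1 then ["Odious"] else ["Evil"]
  if 1 < s && isPrimeB s then lst ++ ["Pernicious"] else lst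

lemma how_bad_eq_bodyA (n : Int) : how_bad n = bodyA (popc n.toNat) := rfl
lemma how_bad_alt_eq_bodyB (n : Int) : how_bad_alt n = bodyB (popc n.toNat) := rfl

-- full scan and √-bounded trial division agree for every popcount value s ≤ 32
lemma body_eq : ∀ s < 33, bodyA s = bodyB s := by decide

lemma popcAux_le (fuel : Nat) : ∀ n k, n < 2 ^ k → popcAux fuel n ≤ k := by
  induction fuel with
  | zero => intro n k _; simp [popcAux]
  | succ fuel ih =>
    intro n k h
    rw [popcAux]
    by_cases hn : n = 0
    · simp [hn]
    · simp only [if_neg hn]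
      have hk : k ≠ 0 := by
        rintro rfl; simp at h; omega
      obtain ⟨k', rfl⟩ := Nat.exists_eq_succ_of_ne_zero hk
      have hdiv : n / 2 < 2 ^ k' := by
        have : n < 2 ^ k' * 2 := by rw [pow_succ] at h; exact h
        omega
      have := ih (n / 2) k' hdiv
      have := Nat.mod_lt n (show 0 < 2 by norm_num)
      omega

lemma popc_le_32 (m : Nat) (h : m ≤ 2 ^ 31) : popc m ≤ 32 := by
  have : m < 2 ^ 32 := by
    have : (2:Nat) ^ 31 < 2 ^ 32 := by norm_num
    omega
  exact popcAux_le m m 32 this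

-- ===== VERDICT (by name: the statement is the Claim_ definition above) =====
theorem how_bad_spec : Claim_equal_how_bad := by
  intro n hdom hpre
  show how_bad n = how_bad_alt n
  rw [how_bad_eq_bodyA, how_bad_alt_eq_bodyB]
  apply body_eq
  have hbound : n.toNat ≤ 2 ^ 31 := by
    unfold Dom_how_bad pvDomInt at hdom
    simp at hdom
    omega
  have := popc_le_32 n.toNat hbound
  omega
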